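-- pv_equiv track=rewrite | github.com/Akhilez/lexical_lab | companies/tempus/named_entity_extractor.py | _get_entities_data_for_sentence
-- ===== SOURCE A (Python) =====
-- from typing import Dict
-- from typing import Tuple
-- from typing import List
--
-- def _get_entities_data_for_sentence(
--     sentence: str, category_keywords: Dict[str, List[str]]
-- ):
--     """
--     This function checks for all the words in the given sentence if they are one of the entity names.
--     If such entity exists, then it's start and end indices are recorded.
--     """
--     data: List[Tuple[int, int, str]] = []
--
--     for category in category_keywords:
--         for keyword in category_keywords[category]:
--             pieces = keyword.split(" ")
--             words = sentence.split(" ")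
--             current_index = 0
--             for word in words:
--                 # This is a brute force search.
--                 # If the first word matches, then check for the rest of the words.
--                 if pieces[0].lower() == word.lower():
--                     end_index = current_index + len(keyword)
--                     if sentence[current_index:end_index].lower() == keyword.lower():
--                         data.append((current_index, end_index, category))
--                 current_index += len(word) + 1
--     return data
-- ===== SOURCE B (Python) =====
-- def _get_entities_data_for_sentence(sentence, category_keywords):
--     # Split the sentence once; index word start positions by lowercased word,
--     # then each keyword only probes the positions of its (lowercased) first word.
--     words = sentence.split(" ")
--     positions = {}
--     idx = 0
--     for w in words:
--         positions.setdefault(w.lower(), []).append(idx)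
--         idx += len(w) + 1
--     s_low = sentence.lower()
--     data = []
--     for category, keywords in category_keywords.items():
--         for keyword in keywords:
--             first = keyword.split(" ")[0].lower()
--             k_low = keyword.lower()
--             n = len(keyword)
--             for start in positions.get(first, []):
--                 if s_low[start:start + n] == k_low:
--                     data.append((start, start + n, category))
--     return data
-- ===== Notes on version B (the rewrite author's own statement) =====
-- stated objective: faster
-- what changed: Instead of re-splitting the sentence and scanning every word for every keyword, B splits the sentence once, builds a dict from lowercased word to its list of start positions, and each keyword only checks the positions listed under its lowercased first word against the pre-lowercased sentence.
import Mathlib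
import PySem

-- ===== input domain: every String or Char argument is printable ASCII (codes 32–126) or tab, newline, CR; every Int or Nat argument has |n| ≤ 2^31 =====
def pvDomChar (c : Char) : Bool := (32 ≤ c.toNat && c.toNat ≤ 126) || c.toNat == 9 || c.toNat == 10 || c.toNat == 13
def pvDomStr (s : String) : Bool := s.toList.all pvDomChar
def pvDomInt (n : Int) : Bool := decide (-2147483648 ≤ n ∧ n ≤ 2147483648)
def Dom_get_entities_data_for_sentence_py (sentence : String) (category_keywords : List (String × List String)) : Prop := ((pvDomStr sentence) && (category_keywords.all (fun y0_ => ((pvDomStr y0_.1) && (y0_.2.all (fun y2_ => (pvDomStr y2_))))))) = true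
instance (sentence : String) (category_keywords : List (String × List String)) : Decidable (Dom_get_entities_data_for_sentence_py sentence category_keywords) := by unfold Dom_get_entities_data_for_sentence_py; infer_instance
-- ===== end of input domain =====

-- ===== PORT A =====
-- B replaces A's per-keyword rescan of the sentence by a one-pass index of word
-- start positions keyed by lowercased word (objective: faster).
-- Both ports first normalise the association list into a PySem.Dict, modelling the
-- Python dict argument (duplicate keys overwrite in place, as dict() does).
def get_entities_data_for_sentence_py (sentence : String) (category_keywords : List (String × List String)) : List (Int × Int × String) :=
  let d : PySem.Dict String (List String) := PySem.Dict.ofList category_keywords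
  d.keys.foldl (fun data category =>
    (d.getD category []).foldl (fun data keyword =>
      let pieces := PySem.Chars.splitOn keyword.toList [' ']
      let words := PySem.Chars.splitOn sentence.toList [' ']
      (words.foldl (fun (st : Int × List (Int × Int × String)) word =>
        let st2 :=
          if PySem.Chars.lower (PySem.List.pyGetD pieces 0 []) == PySem.Chars.lower word then
            (if PySem.Chars.lower (PySem.Chars.slice sentence.toList (some st.1) (some (st.1 + (keyword.toList.length : Int)))) == PySem.Chars.lower keyword.toList then
              (st.1, st.2 ++ [(st.1, st.1 + (keyword.toList.length : Int), category)])
            else (st.1, st.2))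
          else (st.1, st.2)
        (st2.1 + (word.length : Int) + 1, st2.2)) (0, data)).2) data) []

-- ===== PORT B =====
def get_entities_data_for_sentence_py_alt (sentence : String) (category_keywords : List (String × List String)) : List (Int × Int × String) :=
  let d : PySem.Dict String (List String) := PySem.Dict.ofList category_keywords
  let words := PySem.Chars.splitOn sentence.toList [' ']
  let positions : PySem.Dict (List Char) (List Int) :=
    (words.foldl (fun (st : Int × PySem.Dict (List Char) (List Int)) w =>
      (st.1 + (w.length : Int) + 1, st.2.modify (PySem.Chars.lower w) [] (· ++ [st.1]))) (0, PySem.Dict.empty)).2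
  let sLow := PySem.Chars.lower sentence.toList
  d.items.foldl (fun data cat =>
    cat.2.foldl (fun data keyword =>
      let first := PySem.Chars.lower (PySem.List.pyGetD (PySem.Chars.splitOn keyword.toList [' ']) 0 [])
      let kLow := PySem.Chars.lower keyword.toList
      data ++ (positions.getD first []).foldl (fun acc start =>
        if PySem.List.slice sLow (some start) (some (start + (keyword.toList.length : Int))) == kLow then
          acc ++ [(start, start + (keyword.toList.length : Int), cat.1)]
        else acc) []) data) []

-- ===== PRECONDITION & SPEC =====
def Spec_get_entities_data_for_sentence_py (sentence : String) (category_keywords : List (String × List String)) (out : List (Int × Int × String)) : Prop := out = get_entities_data_for_sentence_py_alt sentence category_keywords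
instance (sentence : String) (category_keywords : List (String × List String)) (out : List (Int × Int × String)) : Decidable (Spec_get_entities_data_for_sentence_py sentence category_keywords out) := by unfold Spec_get_entities_data_for_sentence_py; infer_instance

-- ===== CLAIM (what is proved, stated in full; the proofs are below) =====
def Claim_equal_get_entities_data_for_sentence_py : Prop := ∀ (sentence : String) (category_keywords : List (String × List String)), Dom_get_entities_data_for_sentence_py sentence category_keywords → Spec_get_entities_data_for_sentence_py sentence category_keywords (get_entities_data_for_sentence_py sentence category_keywords)

-- ===== LEMMAS AND PROOFS =====

-- words of the sentence paired with their running start index (proof-side view of both loops)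
def pvWStarts : List (List Char) → Int → List (List Char × Int)
  | [], _ => []
  | w :: ws, i => (w, i) :: pvWStarts ws (i + (w.length : Int) + 1)

-- lower commutes with slicing (lower is a per-char map, so lengths are preserved)
theorem pv_lower_slice (cs : List Char) (a b : Int) :
    PySem.Chars.lower (PySem.Chars.slice cs (some a) (some b))
      = PySem.List.slice (PySem.Chars.lower cs) (some a) (some b) := by
  simp [PySem.Chars.lower, PySem.List.slice, List.map_take, List.map_drop]

-- A's scan over the words, with its running index, as filter-then-map over pvWStarts
theorem pv_A_inner (c1 : List Char → Bool) (c2 : Int → Bool) (F : Int → (Int × Int × String)) :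
    ∀ (ws : List (List Char)) (i : Int) (data : List (Int × Int × String)),
      (ws.foldl (fun (st : Int × List (Int × Int × String)) word =>
        let st2 := if c1 word then (if c2 st.1 then (st.1, st.2 ++ [F st.1]) else (st.1, st.2)) else (st.1, st.2)
        (st2.1 + (word.length : Int) + 1, st2.2)) (i, data)).2
      = data ++ ((pvWStarts ws i).filter (fun p => c1 p.1 && c2 p.2)).map (fun p => F p.2) := by
  intro ws
  induction ws with
  | nil => intro i data; simp [pvWStarts]
  | cons w ws ih =>
    intro i data
    simp only [List.foldl_cons, pvWStarts, List.filter_cons]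
    by_cases h1 : c1 w = true
    · by_cases h2 : c2 i = true
      · simp [h1, h2, ih, List.append_assoc]
      · simp [h1, h2, ih]
    · simp [h1, ih]

-- B's build loop equals a fold of modifies over the lowered (word, start) pairs
theorem pv_B_build :
    ∀ (ws : List (List Char)) (i : Int) (d : PySem.Dict (List Char) (List Int)),
      (ws.foldl (fun (st : Int × PySem.Dict (List Char) (List Int)) w =>
        (st.1 + (w.length : Int) + 1, st.2.modify (PySem.Chars.lower w) [] (· ++ [st.1]))) (i, d)).2
      = ((pvWStarts ws i).map (fun p => (PySem.Chars.lower p.1, p.2))).foldl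
          (fun d p => d.modify p.1 [] (· ++ [p.2])) d := by
  intro ws
  induction ws with
  | nil => intro i d; simp [pvWStarts]
  | cons w ws ih => intro i d; simp [pvWStarts, ih]

-- the two programs, written out let-free (definitionally equal to the unfolded ports)
theorem pv_main (sentence : String) (ck : List (String × List String)) :
    (List.foldl (fun data category =>
      List.foldl (fun data keyword =>
        (List.foldl (fun (st : Int × List (Int × Int × String)) word =>
          let st2 :=
            if PySem.Chars.lower (PySem.List.pyGetD (PySem.Chars.splitOn keyword.toList [' ']) 0 []) == PySem.Chars.lower word then
              (if PySem.Chars.lower (PySem.Chars.slice sentence.toList (some st.1) (some (st.1 + (keyword.toList.length : Int)))) == PySem.Chars.lower keyword.toList then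
                (st.1, st.2 ++ [(st.1, st.1 + (keyword.toList.length : Int), category)])
              else (st.1, st.2))
            else (st.1, st.2)
          (st2.1 + (word.length : Int) + 1, st2.2))
          (0, data) (PySem.Chars.splitOn sentence.toList [' '])).2)
        data ((PySem.Dict.ofList ck).getD category []))
      [] (PySem.Dict.ofList ck).keys)
    = List.foldl (fun data cat =>
        List.foldl (fun data keyword =>
          data ++ (((List.foldl (fun (st : Int × PySem.Dict (List Char) (List Int)) w =>
              (st.1 + (w.length : Int) + 1, st.2.modify (PySem.Chars.lower w) [] (· ++ [st.1])))
              (0, PySem.Dict.empty) (PySem.Chars.splitOn sentence.toList [' '])).2).getD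
                (PySem.Chars.lower (PySem.List.pyGetD (PySem.Chars.splitOn keyword.toList [' ']) 0 [])) []).foldl
            (fun acc start =>
              if PySem.List.slice (PySem.Chars.lower sentence.toList) (some start) (some (start + (keyword.toList.length : Int))) == PySem.Chars.lower keyword.toList then
                acc ++ [(start, start + (keyword.toList.length : Int), cat.1)]
              else acc) [])
          data cat.2)
        [] (PySem.Dict.ofList ck).items := by
  have hnd : (PySem.Dict.ofList ck (ν := List String)).keys.Nodup := PySem.Dict.nodup_keys_ofList ck
  rw [PySem.Dict.items_eq_map_keys _ hnd [], List.foldl_map]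
  apply PySem.List.foldl_congr_mem
  intro data category hcat
  apply PySem.List.foldl_congr_mem
  intro data' keyword hkw
  rw [pv_A_inner
        (fun word => PySem.Chars.lower (PySem.List.pyGetD (PySem.Chars.splitOn keyword.toList [' ']) 0 []) == PySem.Chars.lower word)
        (fun ci => PySem.Chars.lower (PySem.Chars.slice sentence.toList (some ci) (some (ci + (keyword.toList.length : Int)))) == PySem.Chars.lower keyword.toList)
        (fun ci => (ci, ci + (keyword.toList.length : Int), category))
        (PySem.Chars.splitOn sentence.toList [' ']) 0 data']
  congr 1
  rw [pv_B_build, PySem.Dict.getD_foldl_modify_append, PySem.Dict.getD_empty, List.nil_append,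
      PySem.List.foldl_append_if, List.nil_append]
  rw [List.filter_map, List.map_map, List.filter_filter, List.filter_map, List.map_map]
  refine congr (congrArg List.map (funext fun p => rfl)) (List.filter_congr ?_)
  intro p hp
  simp only [Function.comp]
  rw [pv_lower_slice]
  rw [Bool.and_comm]
  rw [Bool.beq_comm (a := PySem.Chars.lower (PySem.List.pyGetD (PySem.Chars.splitOn keyword.toList [' ']) 0 [])) (b := PySem.Chars.lower p.1)]

-- ===== VERDICT (by name: the statement is the Claim_ definition above) =====
theorem get_entities_data_for_sentence_py_spec : Claim_equal_get_entities_data_for_sentence_py := by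
  intro sentence ck _
  unfold Spec_get_entities_data_for_sentence_py
  unfold get_entities_data_for_sentence_py get_entities_data_for_sentence_py_alt
  exact pv_main sentence ck
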